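-- pv_equiv track=rewrite | github.com/vishnu-png/python | Day1/program7.py | count_sorted_vowel_strings
-- ===== SOURCE A (Python) =====
-- def count_sorted_vowel_strings(n):
--     vowels = ['a', 'e', 'i', 'o', 'u']
--
--     def backtrack(current_str, length):
--         if length == 0:
--             return 1
--         count = 0
--         for vowel in vowels:
--             if not current_str or vowel >= current_str[-1]:
--                 count += backtrack(current_str + vowel, length - 1)
--         return count
--
--     return backtrack('', n)
-- ===== SOURCE B (Python) =====
-- def count_sorted_vowel_strings(n):
--     # closed form: number of multisets of size n from 5 vowels = C(n+4, 4)
--     return (n + 1) * (n + 2) * (n + 3) * (n + 4) // 24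
-- ===== Notes on version B (the rewrite author's own statement) =====
-- stated objective: faster
-- what changed: Replaced the exponential backtracking enumeration of all non-decreasing vowel strings by the closed-form multiset count C(n+4,4) computed as (n+1)(n+2)(n+3)(n+4)//24.
import Mathlib
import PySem

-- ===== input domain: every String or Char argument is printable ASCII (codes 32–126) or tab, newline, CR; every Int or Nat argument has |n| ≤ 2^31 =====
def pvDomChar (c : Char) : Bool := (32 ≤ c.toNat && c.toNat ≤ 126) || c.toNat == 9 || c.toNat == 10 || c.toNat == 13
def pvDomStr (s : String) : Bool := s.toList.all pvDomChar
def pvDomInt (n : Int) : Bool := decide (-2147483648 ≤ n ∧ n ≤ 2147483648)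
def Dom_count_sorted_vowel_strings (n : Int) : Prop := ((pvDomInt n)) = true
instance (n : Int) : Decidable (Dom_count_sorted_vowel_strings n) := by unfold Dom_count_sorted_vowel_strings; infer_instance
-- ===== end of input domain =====

-- B replaces A's recursive backtracking enumeration by the closed form C(n+4,4) = (n+1)(n+2)(n+3)(n+4)//24 (faster, asymptotic).


-- ===== PORT A =====
-- backtrack(current_str, length): Nat fuel plays Python's `length` (Pre_ guarantees n ≥ 0;
-- for negative n Python recurses forever and raises RecursionError).
-- `not current_str or vowel >= current_str[-1]` on the last character of the string
def allowedA (last : Option Char) (vowel : Char) : Bool :=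
  match last with
  | none => true
  | some c => c ≤ vowel

def backtrackA (cur : List Char) : Nat → Int
  | 0 => 1
  | l + 1 =>
    (['a', 'e', 'i', 'o', 'u'] : List Char).foldl
      (fun count vowel =>
        if allowedA cur.getLast? vowel then count + backtrackA (cur ++ [vowel]) l
        else count) 0

def count_sorted_vowel_strings (n : Int) : Int :=
  if n < 0 then 0 else backtrackA [] n.toNat   -- guard only totalises (Python raises for n < 0)

-- ===== PORT B =====
def count_sorted_vowel_strings_alt (n : Int) : Int :=
  PySem.Int.floordiv ((n + 1) * (n + 2) * (n + 3) * (n + 4)) 24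

-- ===== PRECONDITION & SPEC =====
-- Pre_ excludes n < 0, on which Python A exceeds the recursion limit (RecursionError).
def Pre_count_sorted_vowel_strings (n : Int) : Prop := 0 ≤ n
instance (n : Int) : Decidable (Pre_count_sorted_vowel_strings n) := by
  unfold Pre_count_sorted_vowel_strings; infer_instance
def pvWitness_count_sorted_vowel_strings : Int := 3


def Spec_count_sorted_vowel_strings (n : Int) (out : Int) : Prop := out = count_sorted_vowel_strings_alt n
instance (n : Int) (out : Int) : Decidable (Spec_count_sorted_vowel_strings n out) := by unfold Spec_count_sorted_vowel_strings; infer_instance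

-- ===== CLAIM (what is proved, stated in full; the proofs are below) =====
def Claim_equal_count_sorted_vowel_strings : Prop := ∀ (n : Int), Dom_count_sorted_vowel_strings n → Pre_count_sorted_vowel_strings n → Spec_count_sorted_vowel_strings n (count_sorted_vowel_strings n)

-- ===== LEMMAS AND PROOFS =====

-- Ncnt k m = number of non-decreasing length-m strings over the k largest vowels (Pascal recurrence).
def Ncnt : Nat → Nat → Int
  | 0, _ => 0
  | _ + 1, 0 => 1
  | k + 1, m + 1 => Ncnt k (m + 1) + Ncnt (k + 1) m

lemma backtrackA_eq (m : Nat) : ∀ cur : List Char,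
    (cur.getLast? = none → backtrackA cur m = Ncnt 5 m) ∧
    (cur.getLast? = some 'a' → backtrackA cur m = Ncnt 5 m) ∧
    (cur.getLast? = some 'e' → backtrackA cur m = Ncnt 4 m) ∧
    (cur.getLast? = some 'i' → backtrackA cur m = Ncnt 3 m) ∧
    (cur.getLast? = some 'o' → backtrackA cur m = Ncnt 2 m) ∧
    (cur.getLast? = some 'u' → backtrackA cur m = Ncnt 1 m) := by
  induction m with
  | zero => intro cur; simp [backtrackA, Ncnt]
  | succ m ih =>
    intro cur
    refine ⟨?_, ?_, ?_, ?_, ?_, ?_⟩ <;> intro h <;>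
      simp only [backtrackA, List.foldl, h, allowedA] <;>
      rw [(ih (cur ++ ['u'])).2.2.2.2.2 (by simp)]
    · rw [(ih (cur ++ ['a'])).2.1 (by simp), (ih (cur ++ ['e'])).2.2.1 (by simp),
          (ih (cur ++ ['i'])).2.2.2.1 (by simp), (ih (cur ++ ['o'])).2.2.2.2.1 (by simp)]
      simp [Ncnt]; ring
    · rw [(ih (cur ++ ['a'])).2.1 (by simp), (ih (cur ++ ['e'])).2.2.1 (by simp),
          (ih (cur ++ ['i'])).2.2.2.1 (by simp), (ih (cur ++ ['o'])).2.2.2.2.1 (by simp)]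
      simp [Ncnt]; ring
    · rw [(ih (cur ++ ['e'])).2.2.1 (by simp), (ih (cur ++ ['i'])).2.2.2.1 (by simp),
          (ih (cur ++ ['o'])).2.2.2.2.1 (by simp)]
      simp [Ncnt]; ring
    · rw [(ih (cur ++ ['i'])).2.2.2.1 (by simp), (ih (cur ++ ['o'])).2.2.2.2.1 (by simp)]
      simp [Ncnt]; ring
    · rw [(ih (cur ++ ['o'])).2.2.2.2.1 (by simp)]
      simp [Ncnt]; ring
    · simp [Ncnt]

lemma Ncnt_closed (m : Nat) :
    Ncnt 1 m = 1 ∧ Ncnt 2 m = m + 1 ∧ Ncnt 3 m * 2 = (m + 1) * (m + 2) ∧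
    Ncnt 4 m * 6 = (m + 1) * (m + 2) * (m + 3) ∧
    Ncnt 5 m * 24 = (m + 1) * (m + 2) * (m + 3) * (m + 4) := by
  induction m with
  | zero => simp [Ncnt]
  | succ m ih =>
    obtain ⟨h1, h2, h3, h4, h5⟩ := ih
    refine ⟨?_, ?_, ?_, ?_, ?_⟩ <;> simp only [Ncnt] <;> push_cast <;>
      nlinarith [h1, h2, h3, h4, h5]

-- ===== VERDICT (by name: the statement is the Claim_ definition above) =====
theorem count_sorted_vowel_strings_spec : Claim_equal_count_sorted_vowel_strings := by
  intro n _ hpre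
  unfold Spec_count_sorted_vowel_strings count_sorted_vowel_strings count_sorted_vowel_strings_alt
  have hn : ¬ n < 0 := by exact not_lt.mpr hpre
  rw [if_neg hn]
  have hb := (backtrackA_eq n.toNat []).1 rfl
  have hc := (Ncnt_closed n.toNat).2.2.2.2
  have hcast : ((n.toNat : Int)) = n := Int.toNat_of_nonneg hpre
  rw [hb]
  have h24 : (n + 1) * (n + 2) * (n + 3) * (n + 4) = Ncnt 5 n.toNat * 24 := by
    rw [hc]; push_cast [hcast]; ring
  rw [h24]
  rw [show (24 : Int) = ((24 : Nat) : Int) from rfl] at *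
  rw [PySem.Int.floordiv_eq_ediv_of_pos (by norm_num)]
  omega
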